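-- pv_equiv track=rewrite | github.com/TortugaLabs/mypielib | mypielib/doctesting.py | _extract_str
-- ===== SOURCE A (Python) =====
-- def _extract_str(marker:str, text:str|None) -> str|None:
--   '''Extract the test data from the docstring
--   '''
--   if text is None: return text
--   # ic(marker,text)
--
--   # Determine the exact location of marker
--   mrkrpos = text.find(marker)
--   bol = text.rfind('\n',0,mrkrpos)+1
--   start = text.find('\n', mrkrpos + len(marker) + 2)+1
--   # ic(mrkrpos, bol, start)
--   if start == 0: return None
--
--   # Calculate indentation...
--   # ic(text[bol:start])
--   i = bol
--   while i < start and text[i].isspace(): i += 1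
--   prefix = text[bol:i]
--   # ic(prefix)
--   if prefix != '' and not prefix.isspace(): return None
--
--   # Remove continuation lines...
--   lenprefix3 = len(prefix)+3
--   prefixcont = prefix + '...'
--   # ic(lenprefix3, prefixcont)
--   while text[start:start+lenprefix3] == prefixcont:
--     start = text.find('\n',start+lenprefix3)+1
--     if start == 0: return None
--
--   # OK found the actual begining of test data
--   # determine the end of test data
--   end = start
--   prefixnext = prefix + '>>>'
--
--   # ic(end,prefixnext)
--   while end < len(text):
--     if text[end:end+lenprefix3] == prefixnext:
--       # Found the ">>>" line
--       break
--     n = text.find('\n', end)+1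
--     if n == 0:
--       # Reached the end of the string
--       end = len(text)
--       break
--     if text[end:n].isspace():
--       # This was a blank line
--       break
--     end = n
--
--   # ic(end)
--
--   # Remove indetation
--   text = ('\n'.join([item[len(prefix):] if item.startswith(prefix) else item for item in text[start:end].split('\n')])).rstrip()
--
--   # matched = text if  (zz:=text.find('\n')) == -1 else (text[:zz] + "...")
--   # ic(marker, matched)
--   return text
-- ===== SOURCE B (Python) =====
-- def _extract_str(marker, text):
--   '''Extract the test data from the docstring'''
--   if text is None: return None
--
--   # Locate the marker line and the start of the data block
--   mpos = text.find(marker)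
--   bol = text.rfind('\n', 0, mpos) + 1
--   start = text.find('\n', mpos + len(marker) + 2) + 1
--   if start == 0: return None
--
--   # Indentation prefix: the leading whitespace of the marker line
--   seg = text[bol:start]
--   prefix = seg[:len(seg) - len(seg.lstrip())]
--
--   # Skip the "..." continuation lines
--   rest = text[start:]
--   cont = prefix + '...'
--   while rest.startswith(cont):
--     _, sep, rest = rest[len(cont):].partition('\n')
--     if not sep: return None
--
--   # Collect the data lines until a ">>>" line, a blank line or the end
--   nxt = prefix + '>>>'
--   lines = []
--   while rest and not rest.startswith(nxt):
--     line, sep, rest = rest.partition('\n')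
--     if not sep:
--       lines.append(line)
--       break
--     if (line + sep).isspace():
--       break
--     lines.append(line)
--
--   # De-indent and assemble
--   lines = [l[len(prefix):] if l.startswith(prefix) else l for l in lines]
--   return '\n'.join(lines).rstrip()
-- ===== Notes on version B (the rewrite author's own statement) =====
-- stated objective: simpler
-- what changed: A drives the whole parse with character indices (find/rfind positions, index while-loops and slice comparisons); B, after locating the data start once, destructures the remaining suffix line by line with startswith/partition and an accumulator of collected lines, so all index arithmetic and the final split-of-a-slice disappear.
import Mathlib
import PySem

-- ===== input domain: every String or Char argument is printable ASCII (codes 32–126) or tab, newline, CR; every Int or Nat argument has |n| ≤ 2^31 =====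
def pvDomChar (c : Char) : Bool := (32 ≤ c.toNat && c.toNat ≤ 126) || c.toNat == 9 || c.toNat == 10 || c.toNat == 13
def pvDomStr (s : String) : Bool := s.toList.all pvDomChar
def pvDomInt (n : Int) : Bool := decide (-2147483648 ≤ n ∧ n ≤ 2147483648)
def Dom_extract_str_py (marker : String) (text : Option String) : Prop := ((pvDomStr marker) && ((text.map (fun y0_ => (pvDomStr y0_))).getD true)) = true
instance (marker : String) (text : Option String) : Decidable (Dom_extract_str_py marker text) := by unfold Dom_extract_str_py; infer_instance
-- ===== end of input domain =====

-- B replaces A's character-index arithmetic by suffix destructuring with an accumulated list of lines (objective: simpler).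

-- ===== PORT A =====

-- bounds of s.find(sub, k) when it succeeds (cited by the ports' termination proofs)
theorem find_found_bounds_pv (t sub : List Char) (hsub : sub ≠ [])
    (h : PySem.Chars.find t sub ≠ -1) :
    0 ≤ PySem.Chars.find t sub ∧ PySem.Chars.find t sub + sub.length ≤ t.length := by
  have h0 := PySem.Chars.neg_one_le_find t sub
  have h1 : 0 ≤ PySem.Chars.find t sub := by omega
  have hs := (PySem.Chars.find_spec h1).1.length_le
  have h2 : 0 < sub.length := List.length_pos_of_ne_nil hsub
  simp [List.length_drop] at hs
  omega

theorem findFrom_bounds_pv (s sub : List Char) (k : Int) (hsub : sub ≠ [])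
    (h : PySem.Chars.findFrom s sub k none ≠ -1) :
    k ≤ PySem.Chars.findFrom s sub k none ∧ 0 ≤ PySem.Chars.findFrom s sub k none ∧
      PySem.Chars.findFrom s sub k none < s.length := by
  have hlp : 0 < sub.length := List.length_pos_of_ne_nil hsub
  unfold PySem.Chars.findFrom at h ⊢
  simp only [lt_irrefl, if_false, Int.toNat_natCast, List.take_length, Int.toNat_zero, List.drop_zero] at h ⊢
  split_ifs at h ⊢ with h1 h2 h3 <;> try omega
  all_goals
    rename_i hf
    simp only [Int.toNat_zero, List.drop_zero] at hf h ⊢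
    have hb := find_found_bounds_pv _ sub hsub hf
    simp only [List.length_drop, Int.toNat_zero, List.drop_zero] at hb
    refine ⟨by omega, by omega, by omega⟩

-- while i < start and text[i].isspace(): i += 1   (text[i] is always in range here, so .elim false is exact)
def aIndent (s : List Char) (start i : Int) : Int :=
  if h : i < start ∧ ((PySem.List.pyGet? s i).elim false PySem.Chars.isspace) then
    aIndent s start (i + 1)
  else i
  termination_by (start - i).toNat
  decreasing_by omega


-- the "remove continuation lines" while-loop; returns the new value of start (none = the `return None` inside)
def aCont (s pre : List Char) (start : Int) : Option Int :=
  if _h1 : PySem.List.slice s (some start) (some (start + (pre.length + 3))) = pre ++ ['.', '.', '.'] then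
    let n := PySem.Chars.findFrom s ['\n'] (start + (pre.length + 3)) none + 1
    if _h2 : n = 0 then none else aCont s pre n
  else some start
  termination_by (s.length + 2 - start).toNat
  decreasing_by
    have hb := findFrom_bounds_pv s ['\n'] (start + (pre.length + 3)) (by simp) (by omega)
    omega

-- the "determine the end of test data" while-loop; returns end
def aEnd (s pre : List Char) (e : Int) : Int :=
  if _hl : e < (s.length : Int) then
    if _h1 : PySem.List.slice s (some e) (some (e + (pre.length + 3))) = pre ++ ['>', '>', '>'] then e
    else
      let n := PySem.Chars.findFrom s ['\n'] e none + 1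
      if _h2 : n = 0 then (s.length : Int)
      else if PySem.Chars.strIsspace (PySem.List.slice s (some e) (some n)) then e
      else aEnd s pre n
  else e
  termination_by (s.length - e).toNat
  decreasing_by
    have hb := findFrom_bounds_pv s ['\n'] e (by simp) (by omega)
    omega

def extract_str_py (marker : String) (text : Option String) : Option String :=
  match text with
  | none => none
  | some t =>
    let s := t.toList
    let m := marker.toList
    let mrkrpos : Int := PySem.Chars.find s m
    let bol : Int := PySem.Chars.rfindFrom s ['\n'] 0 (some mrkrpos) + 1
    let start : Int := PySem.Chars.findFrom s ['\n'] (mrkrpos + m.length + 2) none + 1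
    if start = 0 then none
    else
      let i := aIndent s start bol
      let pre := PySem.List.slice s (some bol) (some i)
      if pre ≠ [] ∧ ¬ PySem.Chars.strIsspace pre then none
      else
        match aCont s pre start with
        | none => none
        | some start' =>
          let e := aEnd s pre start'
          some (String.ofList (PySem.Chars.rstrip (PySem.Chars.join ['\n']
            ((PySem.Chars.splitOn (PySem.List.slice s (some start') (some e)) ['\n']).map
              (fun item => if PySem.Chars.startswith item pre then PySem.List.slice item (some (pre.length : Int)) none else item)))))

-- ===== PORT B =====
-- while rest.startswith(prefix+'...'): _, sep, rest = rest[len(cont):].partition('\n'); if not sep: return None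
-- (partition('\n') ported by hand: head part = takeWhile (≠ '\n'), the rest after the separator = tail of dropWhile; exact)
def bCont (pre rest : List Char) : Option (List Char) :=
  if _h : PySem.Chars.startswith rest (pre ++ ['.', '.', '.']) then
    match _hm : (rest.drop (pre ++ ['.', '.', '.']).length).dropWhile (fun c => c ≠ '\n') with
    | [] => none
    | _ :: r => bCont pre r
  else some rest
  termination_by rest.length
  decreasing_by
    have h1 := List.length_dropWhile_le (p := fun c => c ≠ '\n') (rest.drop (pre ++ ['.', '.', '.']).length)
    rw [_hm] at h1
    have h2 : (pre ++ ['.', '.', '.']).length ≤ rest.length :=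
      ((PySem.Chars.startswith_iff _ _).mp _h).length_le
    simp at h1 h2 ⊢
    omega

-- the collection loop: gather data lines until a ">>>" line, a blank line or the end of text
def bCollect (pre rest : List Char) : List (List Char) :=
  if rest.isEmpty then []
  else if PySem.Chars.startswith rest (pre ++ ['>', '>', '>']) then []
  else
    let line := rest.takeWhile (fun c => c ≠ '\n')
    match _hm : rest.dropWhile (fun c => c ≠ '\n') with
    | [] => [line]
    | _ :: r =>
      if PySem.Chars.strIsspace (line ++ ['\n']) then []
      else line :: bCollect pre r
  termination_by rest.length
  decreasing_by
    have h1 := List.length_dropWhile_le (p := fun c => c ≠ '\n') rest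
    rw [_hm] at h1
    simp at h1 ⊢
    omega

def extract_str_py_alt (marker : String) (text : Option String) : Option String :=
  match text with
  | none => none
  | some t =>
    let s := t.toList
    let m := marker.toList
    let mpos : Int := PySem.Chars.find s m
    let bol : Int := PySem.Chars.rfindFrom s ['\n'] 0 (some mpos) + 1
    let start : Int := PySem.Chars.findFrom s ['\n'] (mpos + m.length + 2) none + 1
    if start = 0 then none
    else
      let seg := PySem.List.slice s (some bol) (some start)
      let pre := seg.take (seg.length - (PySem.Chars.lstrip seg).length)
      match bCont pre (PySem.List.slice s (some start) none) with
      | none => none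
      | some rest =>
        some (String.ofList (PySem.Chars.rstrip (PySem.Chars.join ['\n']
          ((bCollect pre rest).map
            (fun l => if PySem.Chars.startswith l pre then PySem.List.slice l (some (pre.length : Int)) none else l)))))

-- ===== PRECONDITION & SPEC =====
def Spec_extract_str_py (marker : String) (text : Option String) (out : Option String) : Prop := out = extract_str_py_alt marker text
instance (marker : String) (text : Option String) (out : Option String) : Decidable (Spec_extract_str_py marker text out) := by unfold Spec_extract_str_py; infer_instance

-- ===== CLAIM =====
def Claim_equal_extract_str_py : Prop := ∀ (marker : String) (text : Option String), Dom_extract_str_py marker text → Spec_extract_str_py marker text (extract_str_py marker text)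

-- ===== LEMMAS AND PROOFS =====

theorem singleton_prefix_pv (c : Char) (u : List Char) : [c] <+: u ↔ u.head? = some c := by
  constructor
  · rintro ⟨v, rfl⟩; rfl
  · intro h; cases u with
    | nil => simp at h
    | cons x xs => simp at h; exact ⟨xs, by simp [h]⟩

theorem split_at_char_pv (t : List Char) (c : Char) (h : c ∈ t) :
    t = t.takeWhile (fun x => x ≠ c) ++ c :: (t.dropWhile (fun x => x ≠ c)).tail := by
  have hd : t.dropWhile (fun x => x ≠ c) ≠ [] := by
    intro he
    rw [List.dropWhile_eq_nil_iff] at he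
    have := he c h; simp at this
  have hh : (t.dropWhile (fun x => x ≠ c)).head hd = c := by
    have := List.head_dropWhile_not (p := fun x => x ≠ c) (l := t) hd
    simpa using this
  conv_lhs => rw [← List.takeWhile_append_dropWhile (p := fun x => x ≠ c) (l := t)]
  congr 1
  conv_lhs => rw [← List.cons_head_tail hd]
  rw [hh]

theorem dropWhile_eq_drop_pv {α : Type} (p : α → Bool) (t : List α) :
    t.dropWhile p = t.drop (t.takeWhile p).length := by
  have h1 : List.drop (t.takeWhile p).length (t.takeWhile p ++ t.dropWhile p) = t.dropWhile p :=
    List.drop_left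
  rw [List.takeWhile_append_dropWhile] at h1
  exact h1.symm

theorem find_singleton_pv (t : List Char) (c : Char) (h : c ∈ t) :
    PySem.Chars.find t [c] = ((t.takeWhile (fun x => x ≠ c)).length : Int) := by
  have hsplit := split_at_char_pv t c h
  have hinfix : [c] <:+: t := ⟨t.takeWhile (fun x => x ≠ c), (t.dropWhile (fun x => x ≠ c)).tail, by rw [List.append_assoc, List.singleton_append]; exact hsplit.symm⟩
  have hne : PySem.Chars.find t [c] ≠ -1 := by
    rw [Ne, PySem.Chars.find_eq_neg_one_iff]; simpa using hinfix
  have h0 : 0 ≤ PySem.Chars.find t [c] := by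
    have := PySem.Chars.neg_one_le_find t [c]; omega
  obtain ⟨hpre, hmin⟩ := PySem.Chars.find_spec h0
  set k := (PySem.Chars.find t [c]).toNat with hk
  set j := (t.takeWhile (fun x => x ≠ c)).length with hj
  have hjt : [c] <+: t.drop j := by
    have hdj : t.drop j = c :: (t.dropWhile (fun x => x ≠ c)).tail := by
      conv_lhs => rw [hsplit]
      rw [List.drop_left' (by rw [hj])]
    rw [hdj]
    exact ⟨_, rfl⟩
  have hkj : k ≤ j := by
    by_contra hlt
    exact hmin j (by omega) hjt
  have hjk : j ≤ k := by
    by_contra hlt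
    push Not at hlt
    -- k < j : t[k] = c but t[k] is in takeWhile, so t[k] ≠ c
    have hklen : k < t.length := by
      have := hpre.length_le
      simp at this
      omega
    have hck : t[k] = c := by
      have h5 := (singleton_prefix_pv c (t.drop k)).mp hpre
      rw [List.head?_drop] at h5
      rw [List.getElem?_eq_getElem hklen] at h5
      exact (Option.some_injective _ h5)
    have htk : t[k] ∈ t.takeWhile (fun x => x ≠ c) := by
      have hpfx := List.takeWhile_prefix (l := t) (p := fun x => x ≠ c)
      have hkj' : k < j := hlt
      have h6 := hpfx.getElem (i := k) (by omega)
      have h7 := List.getElem_mem (l := t.takeWhile (fun x => x ≠ c)) (n := k) (h := by omega)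
      rw [h6] at h7
      exact h7
    have := List.mem_takeWhile_imp htk
    simp [hck] at this
  have : k = j := le_antisymm hkj hjk
  omega

theorem go_no_sep_pv (c : Char) (l : List Char) : ∀ (fuel : Nat) (cur : List Char) (acc : List (List Char)),
    (∀ x ∈ l, x ≠ c) → l.length ≤ fuel →
    PySem.Chars.splitOn.go [c] fuel l cur acc = ((cur.reverse ++ l) :: acc).reverse := by
  induction l with
  | nil =>
    intro fuel cur acc _ _
    cases fuel <;> simp [PySem.Chars.splitOn.go.eq_def]
  | cons x xs ih =>
    intro fuel cur acc hne hf
    cases fuel with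
    | zero => simp at hf
    | succ f =>
      rw [PySem.Chars.splitOn.go.eq_def]
      dsimp only
      have hx : ([c].isPrefixOf (x :: xs)) = false := by
        simp [List.isPrefixOf]
        exact fun h => absurd h.symm (hne x (by simp))
      rw [hx]
      simp only [Bool.false_eq_true, if_false]
      rw [ih f (x :: cur) acc (fun y hy => hne y (by simp [hy])) (by simpa using Nat.lt_succ_iff.mp (by simpa using hf))]
      simp

theorem go_acc_pv (c : Char) : ∀ (fuel : Nat) (l cur : List Char) (acc : List (List Char)),
    PySem.Chars.splitOn.go [c] fuel l cur acc = acc.reverse ++ PySem.Chars.splitOn.go [c] fuel l cur [] := by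
  intro fuel
  induction fuel with
  | zero => intro l cur acc; rw [PySem.Chars.splitOn.go.eq_def, PySem.Chars.splitOn.go.eq_def]; dsimp only; simp
  | succ f ih =>
    intro l cur acc
    cases l with
    | nil => rw [PySem.Chars.splitOn.go.eq_def, PySem.Chars.splitOn.go.eq_def]; dsimp only; simp
    | cons x xs =>
      rw [PySem.Chars.splitOn.go.eq_def]
      conv_rhs => rw [PySem.Chars.splitOn.go.eq_def]
      dsimp only
      by_cases hx : [c].isPrefixOf (x :: xs) = true
      · rw [hx]
        simp only [if_true]
        rw [ih (List.drop [c].length (x :: xs)) [] (cur.reverse :: acc),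
            ih (List.drop [c].length (x :: xs)) [] [cur.reverse]]
        simp
      · simp only [hx, Bool.false_eq_true, if_false]
        exact ih xs (x :: cur) acc

theorem go_chunk_pv (c : Char) (l : List Char) : ∀ (fuel : Nat) (cur : List Char) (acc : List (List Char)) (r : List Char),
    (∀ x ∈ l, x ≠ c) → l.length + 1 + r.length ≤ fuel →
    PySem.Chars.splitOn.go [c] fuel (l ++ c :: r) cur acc =
      PySem.Chars.splitOn.go [c] (fuel - (l.length + 1)) r [] ((cur.reverse ++ l) :: acc) := by
  induction l with
  | nil =>
    intro fuel cur acc r _ hf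
    cases fuel with
    | zero => simp at hf
    | succ f =>
      rw [PySem.Chars.splitOn.go.eq_def]
      simp only [List.nil_append]
      try dsimp only
      have hx : ([c].isPrefixOf (c :: r)) = true := by simp [List.isPrefixOf]
      rw [hx]
      simp
  | cons x xs ih =>
    intro fuel cur acc r hne hf
    cases fuel with
    | zero => simp at hf
    | succ f =>
      rw [PySem.Chars.splitOn.go.eq_def]
      simp only [List.cons_append]
      try dsimp only
      have hx : ([c].isPrefixOf (x :: (xs ++ c :: r))) = false := by
        simp [List.isPrefixOf]
        exact fun h => absurd h.symm (hne x (by simp))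
      rw [hx]
      simp only [Bool.false_eq_true, if_false]
      rw [ih f (x :: cur) acc r (fun y hy => hne y (by simp [hy])) (by simp at hf ⊢; omega)]
      simp

theorem splitOn_no_sep_pv (c : Char) (t : List Char) (h : ∀ x ∈ t, x ≠ c) :
    PySem.Chars.splitOn t [c] = [t] := by
  unfold PySem.Chars.splitOn
  rw [go_no_sep_pv c t (t.length + 1) [] [] h (by omega)]
  simp

theorem splitOn_chunk_pv (c : Char) (l r : List Char) (h : ∀ x ∈ l, x ≠ c) :
    PySem.Chars.splitOn (l ++ c :: r) [c] = l :: PySem.Chars.splitOn r [c] := by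
  unfold PySem.Chars.splitOn
  rw [go_chunk_pv c l ((l ++ c :: r).length + 1) [] [] r h (by simp; omega)]
  have hfl : (l ++ c :: r).length + 1 - (l.length + 1) = r.length + 1 := by simp
  rw [hfl, go_acc_pv]
  simp

theorem rstrip_snoc_newline_pv (z : List Char) :
    PySem.Chars.rstrip (z ++ ['\n']) = PySem.Chars.rstrip z := by
  unfold PySem.Chars.rstrip
  rw [List.reverse_append]
  simp [List.dropWhile_cons, show PySem.Chars.isspace '\n' = true from by decide]

theorem rstrip_append_congr_pv (z a b : List Char)
    (h : PySem.Chars.rstrip a = PySem.Chars.rstrip b) :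
    PySem.Chars.rstrip (z ++ a) = PySem.Chars.rstrip (z ++ b) := by
  unfold PySem.Chars.rstrip at h ⊢
  have h2 : List.dropWhile PySem.Chars.isspace a.reverse = List.dropWhile PySem.Chars.isspace b.reverse := by
    have := congrArg List.reverse h
    simpa using this
  rw [List.reverse_append, List.reverse_append, List.dropWhile_append, List.dropWhile_append, h2]

theorem rstrip_join_snoc_nil_pv (xs : List (List Char)) :
    PySem.Chars.rstrip (PySem.Chars.join ['\n'] (xs ++ [[]])) =
      PySem.Chars.rstrip (PySem.Chars.join ['\n'] xs) := by
  induction xs with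
  | nil => simp [PySem.Chars.join_nil, PySem.Chars.join_singleton]
  | cons x t ih =>
    cases t with
    | nil =>
      rw [List.singleton_append, PySem.Chars.join_cons_cons,
          PySem.Chars.join_singleton, PySem.Chars.join_singleton]
      rw [List.append_assoc, List.append_nil]
      exact rstrip_snoc_newline_pv x
    | cons y t2 =>
      rw [List.cons_append, List.cons_append, PySem.Chars.join_cons_cons,
          PySem.Chars.join_cons_cons]
      rw [List.append_assoc, List.append_assoc]
      refine rstrip_append_congr_pv x _ _ ?_
      refine rstrip_append_congr_pv ['\n'] _ _ ?_
      rw [← List.cons_append]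
      exact ih
theorem clampIdx_mono_pv (n : Nat) (a b : Int) (h0 : 0 ≤ a) (h : a ≤ b) :
    PySem.List.clampIdx n a ≤ PySem.List.clampIdx n b := by
  unfold PySem.List.clampIdx
  simp only [min_def]
  split_ifs <;> omega

theorem slice_nil_of_le_pv {α : Type} (xs : List α) (a b : Int) (h0 : 0 ≤ b) (h : b ≤ a) :
    PySem.List.slice xs (some a) (some b) = [] := by
  have h1 := PySem.List.length_slice xs a b
  have h2 := clampIdx_mono_pv xs.length b a h0 h
  exact List.eq_nil_of_length_eq_zero (by omega)

theorem slice_cons_pv (s : List Char) (i start : Int) (h0 : 0 ≤ i) (h1 : i < start)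
    (h2 : start ≤ s.length) :
    PySem.List.slice s (some i) (some start) =
      s[i.toNat]'(by omega) :: PySem.List.slice s (some (i + 1)) (some start) := by
  rw [PySem.List.slice_toNat s h0 (by omega), PySem.List.slice_toNat s (by omega) (by omega)]
  rw [List.drop_eq_getElem_cons (by omega)]
  have h3 : start.toNat - i.toNat = (start.toNat - (i + 1).toNat) + 1 := by omega
  have h4 : (i + 1).toNat = i.toNat + 1 := by omega
  rw [h3, List.take_succ_cons, h4]

theorem aIndent_spec (s : List Char) (start : Int) (hs0 : 0 ≤ start) (hsl : start ≤ s.length) :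
    ∀ i : Int, 0 ≤ i →
    aIndent s start i = i + ((PySem.List.slice s (some i) (some start)).takeWhile PySem.Chars.isspace).length := by
  intro i
  induction i using aIndent.induct s start with
  | case1 i h ih =>
    intro h0
    obtain ⟨hi, hsp⟩ := h
    have hget : PySem.List.pyGet? s i = s[i.toNat]? := by
      conv_lhs => rw [show i = ((i.toNat : Nat) : Int) by omega]
      rw [PySem.List.pyGet?_natCast]
    have hin : i.toNat < s.length := by omega
    rw [hget, List.getElem?_eq_getElem hin] at hsp
    simp only [Option.elim_some] at hsp
    rw [aIndent]
    rw [dif_pos ⟨hi, by rw [hget, List.getElem?_eq_getElem hin]; simpa using hsp⟩]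
    rw [ih (by omega)]
    rw [slice_cons_pv s i start h0 hi hsl]
    rw [List.takeWhile_cons_of_pos hsp]
    simp
    omega
  | case2 i h =>
    intro h0
    rw [aIndent, dif_neg h]
    rcases Decidable.em (i < start) with hlt | hge
    · -- i < start but the char is not a space (or out of range — impossible here)
      have hin : i.toNat < s.length := by omega
      have hget : PySem.List.pyGet? s i = s[i.toNat]? := by
        conv_lhs => rw [show i = ((i.toNat : Nat) : Int) by omega]
        rw [PySem.List.pyGet?_natCast]
      have hsp : PySem.Chars.isspace (s[i.toNat]'hin) = false := by
        by_contra hc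
        apply h
        refine ⟨hlt, ?_⟩
        rw [hget, List.getElem?_eq_getElem hin]
        simp only [Option.elim_some]
        simpa using hc
      rw [slice_cons_pv s i start h0 hlt hsl]
      rw [List.takeWhile_cons_of_neg (by simp [hsp])]
      simp
    · rw [slice_nil_of_le_pv s i start hs0 (by omega)]
      simp

theorem singleton_infix_pv (c : Char) (t : List Char) : [c] <:+: t ↔ c ∈ t := by
  constructor
  · intro h; exact h.subset (by simp)
  · intro h
    refine ⟨t.takeWhile (fun x => x ≠ c), (t.dropWhile (fun x => x ≠ c)).tail, ?_⟩
    rw [List.append_assoc, List.singleton_append]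
    exact (split_at_char_pv t c h).symm

theorem take_eq_iff_prefix_pv (p l : List Char) (n : Nat) (hp : p.length = n) :
    List.take n l = p ↔ p <+: l := by
  constructor
  · intro ht; rw [← ht]; exact List.take_prefix n l
  · intro h; rw [← hp]; exact ((List.prefix_iff_eq_take).mp h).symm

theorem take_length_of_prefix_pv (p l : List Char) (h : p <+: l) : List.take p.length l = p :=
  ((List.prefix_iff_eq_take).mp h).symm

theorem rfind_go_ge_pv (s sub : List Char) (j : Nat) : -1 ≤ PySem.Chars.rfind.go s sub j := by
  induction j with
  | zero => rw [PySem.Chars.rfind.go]; split <;> omega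
  | succ n ih => rw [PySem.Chars.rfind.go]; split; · omega
                 · exact ih

theorem rfindFrom_zero_ge_pv (s sub : List Char) (b : Int) :
    -1 ≤ PySem.Chars.rfindFrom s sub 0 (some b) := by
  have key : -1 ≤ PySem.Chars.rfind (List.drop ((0:Int)).toNat (List.take (if (s.length:Int) < b then (s.length:Int) else if b < 0 then (if b + (s.length:Int) < 0 then 0 else b + (s.length:Int)) else b).toNat s)) sub := by
    unfold PySem.Chars.rfind; exact rfind_go_ge_pv _ _ _
  unfold PySem.Chars.rfindFrom
  dsimp only
  split_ifs at key ⊢ <;> omega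

theorem splitOn_nil_pv (c : Char) : PySem.Chars.splitOn [] [c] = [[]] := by
  unfold PySem.Chars.splitOn
  rw [PySem.Chars.splitOn.go.eq_def]
  simp

theorem slice_take_pv (s : List Char) (a : Int) (m : Nat) (h0 : 0 ≤ a) :
    PySem.List.slice s (some a) (some (a + (m : Int))) = (s.drop a.toNat).take m := by
  rw [PySem.List.slice_toNat s h0 (by omega)]
  congr 1
  omega

theorem cond_iff_pv (s w : List Char) (a : Int) (m : Nat) (h0 : 0 ≤ a) (hw : w.length = m) :
    (PySem.List.slice s (some a) (some (a + (m : Int))) = w) ↔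
      PySem.Chars.startswith (s.drop a.toNat) w = true := by
  rw [slice_take_pv s a m h0, take_eq_iff_prefix_pv w _ m hw, PySem.Chars.startswith_iff]

theorem mem_iff_dropWhile_ne_nil_pv (c : Char) (t : List Char) :
    c ∈ t ↔ t.dropWhile (fun x => x ≠ c) ≠ [] := by
  constructor
  · intro h he
    rw [List.dropWhile_eq_nil_iff] at he
    have := he c h
    simp at this
  · intro h
    by_contra hm
    apply h
    rw [List.dropWhile_eq_nil_iff]
    intro x hx
    simp
    intro he
    exact hm (he ▸ hx)

theorem findFrom_none_pv (s : List Char) (k : Nat) (hk : k ≤ s.length) (h : '\n' ∉ s.drop k) :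
    PySem.Chars.findFrom s ['\n'] (k : Int) none = -1 := by
  rw [PySem.Chars.findFrom_natCast s ['\n'] k hk]
  have hf : PySem.Chars.find (s.drop k) ['\n'] = -1 := by
    rw [PySem.Chars.find_eq_neg_one_iff, singleton_infix_pv]
    exact h
  simp [hf]

theorem findFrom_some_pv (s : List Char) (k : Nat) (hk : k ≤ s.length) (h : '\n' ∈ s.drop k) :
    PySem.Chars.findFrom s ['\n'] (k : Int) none =
      (k : Int) + ((s.drop k).takeWhile (fun x => x ≠ '\n')).length := by
  rw [PySem.Chars.findFrom_natCast s ['\n'] k hk, find_singleton_pv _ _ h]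
  simp

theorem dropWhile_struct_pv (c : Char) (t : List Char) (h : c ∈ t) :
    t.dropWhile (fun x => x ≠ c) =
      c :: t.drop ((t.takeWhile (fun x => x ≠ c)).length + 1) := by
  have h1 := split_at_char_pv t c h
  have hj : (t.takeWhile (fun x => x ≠ c)).length < t.length := by
    conv_rhs => rw [h1]
    simp
  have hc : t[(t.takeWhile (fun x => x ≠ c)).length]'hj = c := by
    rw [List.getElem_of_eq h1]
    rw [List.getElem_append_right (le_refl _)]
    simp
  rw [dropWhile_eq_drop_pv, List.drop_eq_getElem_cons hj, hc]

theorem aCont_spec (pre s : List Char) : ∀ (start : Int), 0 ≤ start → start ≤ s.length →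
    (aCont s pre start = none ∧ bCont pre (s.drop start.toNat) = none) ∨
    (∃ st' : Int, aCont s pre start = some st' ∧ 0 ≤ st' ∧ st' ≤ s.length ∧
      bCont pre (s.drop start.toNat) = some (s.drop st'.toNat)) := by
  intro start
  induction start using aCont.induct s pre with
  | case1 a hcond n hn0 =>
    intro h0 hlen
    have hm : (pre ++ ['.', '.', '.']).length = pre.length + 3 := by simp
    have hcast : a + ((pre.length : Int) + 3) = a + ((pre.length + 3 : Nat) : Int) := by
      push_cast; ring
    have hcond2 : PySem.List.slice s (some a) (some (a + ((pre.length + 3 : Nat) : Int))) = pre ++ ['.', '.', '.'] := by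
      rw [← hcast]; exact hcond
    have hbc := (cond_iff_pv s _ a (pre.length + 3) h0 hm).mp hcond2
    have hnv : n = PySem.Chars.findFrom s ['\n'] (a + ((pre.length : Int) + 3)) none + 1 := rfl
    have hff : PySem.Chars.findFrom s ['\n'] (a + ((pre.length : Int) + 3)) none = -1 := by omega
    have hnil : ((s.drop a.toNat).drop (pre ++ ['.', '.', '.']).length).dropWhile (fun c => c ≠ '\n') = [] := by
      rw [hm, List.drop_drop]
      by_contra hne
      have hmem : '\n' ∈ s.drop (a.toNat + (pre.length + 3)) :=
        (mem_iff_dropWhile_ne_nil_pv '\n' _).mpr hne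
      have hk : a.toNat + (pre.length + 3) ≤ s.length := by
        by_contra hgt
        rw [List.drop_eq_nil_of_le (by omega)] at hmem
        simp at hmem
      have hx := findFrom_some_pv s (a.toNat + (pre.length + 3)) hk hmem
      rw [show ((a.toNat + (pre.length + 3) : Nat) : Int) = a + ((pre.length : Int) + 3) from by push_cast; omega] at hx
      rw [hx] at hff
      omega
    constructor
    constructor
    · rw [aCont, dif_pos hcond]
      dsimp only
      rw [dif_pos hn0]
    · rw [bCont, dif_pos hbc]
      split
      · rfl
      · rename_i c' r hmc
        rw [hnil] at hmc
        simp at hmc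
  | case2 a hcond n hn0 ih =>
    intro h0 hlen
    have hm : (pre ++ ['.', '.', '.']).length = pre.length + 3 := by simp
    have hcast : a + ((pre.length : Int) + 3) = a + ((pre.length + 3 : Nat) : Int) := by
      push_cast; ring
    have hcond2 : PySem.List.slice s (some a) (some (a + ((pre.length + 3 : Nat) : Int))) = pre ++ ['.', '.', '.'] := by
      rw [← hcast]; exact hcond
    have hbc := (cond_iff_pv s _ a (pre.length + 3) h0 hm).mp hcond2
    have hnv : n = PySem.Chars.findFrom s ['\n'] (a + ((pre.length : Int) + 3)) none + 1 := rfl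
    have hff : PySem.Chars.findFrom s ['\n'] (a + ((pre.length : Int) + 3)) none ≠ -1 := by omega
    have hb := findFrom_bounds_pv s ['\n'] _ (by simp) hff
    have hk : a.toNat + (pre.length + 3) ≤ s.length := by omega
    have hkcast : ((a.toNat + (pre.length + 3) : Nat) : Int) = a + ((pre.length : Int) + 3) := by
      push_cast; omega
    have hmem : '\n' ∈ s.drop (a.toNat + (pre.length + 3)) := by
      by_contra hno
      have hx := findFrom_none_pv s (a.toNat + (pre.length + 3)) hk hno
      rw [hkcast] at hx
      exact hff hx
    have hfs := findFrom_some_pv s (a.toNat + (pre.length + 3)) hk hmem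
    rw [hkcast] at hfs
    set t := s.drop (a.toNat + (pre.length + 3)) with ht
    set j := (t.takeWhile (fun x => x ≠ '\n')).length with hj
    have hjlt : j < t.length := by
      have h1 := split_at_char_pv t '\n' hmem
      have h2 : t.length = j + 1 + ((t.dropWhile (fun x => x ≠ '\n')).tail).length := by
        conv_lhs => rw [h1]
        simp [hj]
        try omega
      omega
    have htlen : t.length = s.length - (a.toNat + (pre.length + 3)) := by
      rw [ht]; simp
    have hnval : n = (a : Int) + (pre.length : Int) + 3 + (j : Int) + 1 := by
      rw [hnv, hfs]; push_cast; ring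
    have hn0' : 0 ≤ n := by omega
    have hnlen : n ≤ s.length := by omega
    have hntoNat : n.toNat = a.toNat + (pre.length + 3) + j + 1 := by omega
    have hstruct := dropWhile_struct_pv '\n' t hmem
    have hdropn : t.drop (j + 1) = s.drop n.toNat := by
      rw [ht, List.drop_drop]
      congr 1
      omega
    have hAeq : aCont s pre a = aCont s pre n := by
      rw [aCont, dif_pos hcond]
      dsimp only
      rw [dif_neg hn0]
    have hBeq : bCont pre (s.drop a.toNat) = bCont pre (s.drop n.toNat) := by
      rw [bCont, dif_pos hbc]
      split
      · rename_i hmc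
        rw [hm, List.drop_drop, ← ht] at hmc
        rw [hstruct] at hmc
        simp at hmc
      · rename_i c' r hmc
        rw [hm, List.drop_drop, ← ht, hstruct, ← hj, hdropn] at hmc
        rw [((List.cons.injEq _ _ _ _).mp hmc).2]
    rw [hAeq, hBeq]
    exact ih hn0' hnlen
  | case3 a hcond =>
    intro h0 hlen
    have hm : (pre ++ ['.', '.', '.']).length = pre.length + 3 := by simp
    have hcast : a + ((pre.length : Int) + 3) = a + ((pre.length + 3 : Nat) : Int) := by
      push_cast; ring
    have hbc : ¬ (PySem.Chars.startswith (s.drop a.toNat) (pre ++ ['.', '.', '.']) = true) := by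
      intro hc
      apply hcond
      rw [show a + ((pre.length : Int) + 3) = a + ((pre.length + 3 : Nat) : Int) from hcast]
      exact (cond_iff_pv s _ a (pre.length + 3) h0 hm).mpr hc
    right
    refine ⟨a, ?_, h0, hlen, ?_⟩
    · rw [aCont, dif_neg hcond]
    · rw [bCont, dif_neg hbc]

theorem aEnd_spec (pre s : List Char) : ∀ (e : Int), 0 ≤ e → e ≤ s.length →
    e ≤ aEnd s pre e ∧ aEnd s pre e ≤ s.length ∧
    (bCollect pre (s.drop e.toNat) =
        PySem.Chars.splitOn (PySem.List.slice s (some e) (some (aEnd s pre e))) ['\n'] ∨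
     bCollect pre (s.drop e.toNat) ++ [[]] =
        PySem.Chars.splitOn (PySem.List.slice s (some e) (some (aEnd s pre e))) ['\n']) := by
  intro e
  induction e using aEnd.induct s pre with
  | case1 e hlt hcond =>
    intro h0 hlen
    have hrne : s.drop e.toNat ≠ [] := by
      intro hx
      have := congrArg List.length hx
      simp at this
      omega
    have hm3 : (pre ++ ['>', '>', '>']).length = pre.length + 3 := by simp
    have hcond2 : PySem.List.slice s (some e) (some (e + ((pre.length + 3 : Nat) : Int))) = pre ++ ['>', '>', '>'] := by
      rw [show e + ((pre.length + 3 : Nat) : Int) = e + ((pre.length : Int) + 3) from by push_cast; ring]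
      exact hcond
    have hbc := (cond_iff_pv s _ e (pre.length + 3) h0 hm3).mp hcond2
    have hA : aEnd s pre e = e := by
      rw [aEnd, dif_pos hlt, dif_pos hcond]
    rw [hA]
    refine ⟨le_refl e, hlen, Or.inr ?_⟩
    rw [slice_nil_of_le_pv s e e h0 (le_refl e), splitOn_nil_pv]
    rw [bCollect, if_neg (by simp; omega), if_pos hbc]
    rfl
  | case2 e hlt hcond n hn0 =>
    intro h0 hlen
    have hrne : s.drop e.toNat ≠ [] := by
      intro hx
      have := congrArg List.length hx
      simp at this
      omega
    have hm3 : (pre ++ ['>', '>', '>']).length = pre.length + 3 := by simp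
    have hbc : ¬ (PySem.Chars.startswith (s.drop e.toNat) (pre ++ ['>', '>', '>']) = true) := by
      intro hc
      apply hcond
      have := (cond_iff_pv s _ e (pre.length + 3) h0 hm3).mpr hc
      rw [show e + ((pre.length + 3 : Nat) : Int) = e + ((pre.length : Int) + 3) from by push_cast; ring] at this
      exact this
    have hnv : n = PySem.Chars.findFrom s ['\n'] e none + 1 := rfl
    have hff : PySem.Chars.findFrom s ['\n'] e none = -1 := by omega
    have hke : ((e.toNat : Nat) : Int) = e := by omega
    have hnomem : '\n' ∉ s.drop e.toNat := by
      intro hmem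
      have hx := findFrom_some_pv s e.toNat (by omega) hmem
      rw [hke] at hx
      rw [hx] at hff
      omega
    have hdnil : (s.drop e.toNat).dropWhile (fun x => x ≠ '\n') = [] := by
      by_contra hne
      exact hnomem ((mem_iff_dropWhile_ne_nil_pv '\n' _).mpr hne)
    have hline : (s.drop e.toNat).takeWhile (fun x => x ≠ '\n') = s.drop e.toNat := by
      have := List.takeWhile_append_dropWhile (p := fun x => x ≠ '\n') (l := s.drop e.toNat)
      rw [hdnil, List.append_nil] at this
      exact this
    have hA : aEnd s pre e = (s.length : Int) := by
      rw [aEnd, dif_pos hlt, dif_neg hcond]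
      dsimp only
      rw [dif_pos hn0]
    rw [hA]
    refine ⟨by omega, le_refl _, Or.inl ?_⟩
    have hsl : PySem.List.slice s (some e) (some (s.length : Int)) = s.drop e.toNat := by
      rw [PySem.List.slice_toNat s h0 (by omega)]
      apply List.take_of_length_le
      simp
    rw [hsl, splitOn_no_sep_pv '\n' _ (fun x hx => by rintro rfl; exact hnomem hx)]
    rw [bCollect, if_neg (by simp; omega), if_neg hbc]
    dsimp only
    split
    · rename_i hmc
      rw [hline]
    · rename_i c' r hmc
      rw [hdnil] at hmc
      simp at hmc
  | case3 e hlt hcond n hn0 hsp =>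
    intro h0 hlen
    have hrne : s.drop e.toNat ≠ [] := by
      intro hx
      have := congrArg List.length hx
      simp at this
      omega
    have hm3 : (pre ++ ['>', '>', '>']).length = pre.length + 3 := by simp
    have hbc : ¬ (PySem.Chars.startswith (s.drop e.toNat) (pre ++ ['>', '>', '>']) = true) := by
      intro hc
      apply hcond
      have := (cond_iff_pv s _ e (pre.length + 3) h0 hm3).mpr hc
      rw [show e + ((pre.length + 3 : Nat) : Int) = e + ((pre.length : Int) + 3) from by push_cast; ring] at this
      exact this
    have hnv : n = PySem.Chars.findFrom s ['\n'] e none + 1 := rfl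
    have hff : PySem.Chars.findFrom s ['\n'] e none ≠ -1 := by omega
    have hke : ((e.toNat : Nat) : Int) = e := by omega
    have hmem : '\n' ∈ s.drop e.toNat := by
      by_contra hno
      have hx := findFrom_none_pv s e.toNat (by omega) hno
      rw [hke] at hx
      exact hff hx
    have hfs := findFrom_some_pv s e.toNat (by omega) hmem
    rw [hke] at hfs
    set rest := s.drop e.toNat with hrest
    set line := rest.takeWhile (fun x => x ≠ '\n') with hlinedef
    set j := line.length with hj
    have hstruct : rest.dropWhile (fun x => x ≠ '\n') = '\n' :: rest.drop (j + 1) := by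
      have hx := dropWhile_struct_pv '\n' rest hmem
      rw [← hlinedef, ← hj] at hx
      exact hx
    have hnval : n = e + (j : Int) + 1 := by
      rw [hnv, hfs]
      all_goals (push_cast; ring)
    have hjlt : j < rest.length := by
      have h1 := congrArg List.length (split_at_char_pv rest '\n' hmem)
      rw [← hlinedef] at h1
      simp at h1
      omega
    have hslice_n : PySem.List.slice s (some e) (some n) = line ++ ['\n'] := by
      rw [PySem.List.slice_toNat s h0 (by omega), ← hrest]
      have hsplit := split_at_char_pv rest '\n' hmem
      conv_lhs => rw [hsplit]
      rw [show n.toNat - e.toNat = j + 1 from by omega]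
      rw [List.take_append]
      rw [List.take_of_length_le (by rw [← hlinedef, ← hj]; omega)]
      rw [← hlinedef, ← hj]
      rw [show j + 1 - j = 1 from by omega]
      rw [List.take_succ_cons, List.take_zero]
    have hA : aEnd s pre e = e := by
      rw [aEnd, dif_pos hlt, dif_neg hcond]
      dsimp only
      rw [dif_neg hn0, if_pos hsp]
    rw [hA]
    refine ⟨le_refl e, hlen, Or.inr ?_⟩
    rw [slice_nil_of_le_pv s e e h0 (le_refl e), splitOn_nil_pv]
    rw [bCollect, if_neg (by simp; omega), if_neg hbc]
    dsimp only
    split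
    · rename_i hmc
      rw [hstruct] at hmc
      simp at hmc
    · rename_i c' r hmc
      rw [if_pos (by rw [← hlinedef, ← hslice_n]; exact hsp)]
      rfl
  | case4 e hlt hcond n hn0 hsp ih =>
    intro h0 hlen
    have hrne : s.drop e.toNat ≠ [] := by
      intro hx
      have := congrArg List.length hx
      simp at this
      omega
    have hm3 : (pre ++ ['>', '>', '>']).length = pre.length + 3 := by simp
    have hbc : ¬ (PySem.Chars.startswith (s.drop e.toNat) (pre ++ ['>', '>', '>']) = true) := by
      intro hc
      apply hcond
      have := (cond_iff_pv s _ e (pre.length + 3) h0 hm3).mpr hc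
      rw [show e + ((pre.length + 3 : Nat) : Int) = e + ((pre.length : Int) + 3) from by push_cast; ring] at this
      exact this
    have hnv : n = PySem.Chars.findFrom s ['\n'] e none + 1 := rfl
    have hff : PySem.Chars.findFrom s ['\n'] e none ≠ -1 := by omega
    have hke : ((e.toNat : Nat) : Int) = e := by omega
    have hmem : '\n' ∈ s.drop e.toNat := by
      by_contra hno
      have hx := findFrom_none_pv s e.toNat (by omega) hno
      rw [hke] at hx
      exact hff hx
    have hfs := findFrom_some_pv s e.toNat (by omega) hmem
    rw [hke] at hfs
    set rest := s.drop e.toNat with hrest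
    set line := rest.takeWhile (fun x => x ≠ '\n') with hlinedef
    set j := line.length with hj
    have hstruct : rest.dropWhile (fun x => x ≠ '\n') = '\n' :: rest.drop (j + 1) := by
      have hx := dropWhile_struct_pv '\n' rest hmem
      rw [← hlinedef, ← hj] at hx
      exact hx
    have hnval : n = e + (j : Int) + 1 := by
      rw [hnv, hfs]
      all_goals (push_cast; ring)
    have hjlt : j < rest.length := by
      have h1 := congrArg List.length (split_at_char_pv rest '\n' hmem)
      rw [← hlinedef] at h1
      simp at h1
      omega
    have hrlen : rest.length = s.length - e.toNat := by rw [hrest]; simp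
    have hn0' : 0 ≤ n := by omega
    have hnlen : n ≤ s.length := by omega
    have hntoNat : n.toNat = e.toNat + j + 1 := by omega
    have hslice_n : PySem.List.slice s (some e) (some n) = line ++ ['\n'] := by
      rw [PySem.List.slice_toNat s h0 (by omega), ← hrest]
      have hsplit := split_at_char_pv rest '\n' hmem
      conv_lhs => rw [hsplit]
      rw [show n.toNat - e.toNat = j + 1 from by omega]
      rw [List.take_append]
      rw [List.take_of_length_le (by rw [← hlinedef, ← hj]; omega)]
      rw [← hlinedef, ← hj]
      rw [show j + 1 - j = 1 from by omega]
      rw [List.take_succ_cons, List.take_zero]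
    have hdropn : rest.drop (j + 1) = s.drop n.toNat := by
      rw [hrest, List.drop_drop]
      congr 1
      omega
    obtain ⟨hle1, hle2, hdisj⟩ := ih hn0' hnlen
    have hA : aEnd s pre e = aEnd s pre n := by
      rw [aEnd, dif_pos hlt, dif_neg hcond]
      dsimp only
      rw [dif_neg hn0, if_neg hsp]
    have hB : bCollect pre rest = line :: bCollect pre (s.drop n.toNat) := by
      rw [bCollect, if_neg (by simp; omega), if_neg hbc]
      dsimp only
      split
      · rename_i hmc
        rw [hstruct] at hmc
        simp at hmc
      · rename_i c' r hmc
        rw [hstruct] at hmc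
        rw [if_neg (by rw [← hlinedef, ← hslice_n]; exact hsp)]
        rw [← hlinedef]
        congr 1
        rw [← ((List.cons.injEq _ _ _ _).mp hmc).2, hdropn]
    -- the chunk decomposition of the A-side slice
    have hchunk : PySem.List.slice s (some e) (some (aEnd s pre n)) =
        line ++ '\n' :: PySem.List.slice s (some n) (some (aEnd s pre n)) := by
      set e' := aEnd s pre n with he'
      have hsplit := split_at_char_pv rest '\n' hmem
      rw [PySem.List.slice_toNat s h0 (by omega), ← hrest]
      conv_lhs => rw [hsplit]
      rw [List.take_append]
      rw [List.take_of_length_le (by rw [← hlinedef, ← hj]; omega)]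
      rw [← hlinedef, ← hj]
      have he'e : e'.toNat - e.toNat - j ≥ 1 := by omega
      rw [show e'.toNat - e.toNat - j = (e'.toNat - n.toNat) + 1 from by omega]
      rw [List.take_succ_cons]
      congr 2
      rw [PySem.List.slice_toNat s hn0' (by omega)]
      congr 1
      rw [hstruct]
      simp only [List.tail_cons]
      exact hdropn
    have hnoline : ∀ x ∈ line, x ≠ '\n' := by
      intro x hx
      have := List.mem_takeWhile_imp hx
      simpa using this
    rw [hA, hB, hchunk, splitOn_chunk_pv '\n' line _ hnoline]
    refine ⟨by omega, hle2, ?_⟩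
    rcases hdisj with hl | hr
    · left; rw [hl]
    · right
      rw [← hr]
      simp
  | case5 e hnlt =>
    intro h0 hlen
    have hA : aEnd s pre e = e := by
      rw [aEnd, dif_neg hnlt]
    rw [hA]
    refine ⟨le_refl e, hlen, Or.inr ?_⟩
    rw [slice_nil_of_le_pv s e e h0 (le_refl e), splitOn_nil_pv]
    rw [show s.drop e.toNat = [] from List.drop_eq_nil_of_le (by omega)]
    rw [bCollect]
    simp

-- ===== VERDICT (by name: the statement is the Claim_ definition above) =====
theorem extract_str_py_spec : Claim_equal_extract_str_py := by
  unfold Claim_equal_extract_str_py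
  intro marker text _hdom
  unfold Spec_extract_str_py
  cases text with
  | none => rfl
  | some t =>
    simp only [extract_str_py, extract_str_py_alt]
    set s := t.toList with hs
    set mpos := PySem.Chars.find s marker.toList with hmpos
    set bol := PySem.Chars.rfindFrom s ['\n'] 0 (some mpos) + 1 with hbol
    set start := PySem.Chars.findFrom s ['\n'] (mpos + marker.toList.length + 2) none + 1 with hstart
    by_cases hz : start = 0
    · rw [if_pos hz, if_pos hz]
    · rw [if_neg hz, if_neg hz]
      have hff : PySem.Chars.findFrom s ['\n'] (mpos + marker.toList.length + 2) none ≠ -1 := by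
        intro hx; apply hz; rw [hstart, hx]; ring
      have hfb := findFrom_bounds_pv s ['\n'] _ (by simp) hff
      have hs1 : 1 ≤ start := by omega
      have hs0 : (0:Int) ≤ start := by omega
      have hslen : start ≤ (s.length : Int) := by omega
      have hbol0 : (0:Int) ≤ bol := by
        have := rfindFrom_zero_ge_pv s ['\n'] mpos
        omega
      set seg := PySem.List.slice s (some bol) (some start) with hseg
      set T := seg.takeWhile PySem.Chars.isspace with hT
      have hTpre : T <+: s.drop bol.toNat := by
        have h1 : T <+: seg := by rw [hT]; exact List.takeWhile_prefix _
        have h2 : seg <+: s.drop bol.toNat := by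
          rw [hseg, PySem.List.slice_toNat s hbol0 hs0]
          exact List.take_prefix _ _
        exact h1.trans h2
      have hpreA : PySem.List.slice s (some bol) (some (aIndent s start bol)) = T := by
        rw [aIndent_spec s start hs0 hslen bol hbol0, ← hseg, ← hT, slice_take_pv s bol _ hbol0]
        exact take_length_of_prefix_pv T _ hTpre
      have hpreB : seg.take (seg.length - (PySem.Chars.lstrip seg).length) = T := by
        have hlen : (PySem.Chars.lstrip seg).length = seg.length - T.length := by
          have h1 := congrArg List.length (List.takeWhile_append_dropWhile (p := PySem.Chars.isspace) (l := seg))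
          unfold PySem.Chars.lstrip
          rw [← hT] at h1
          simp at h1
          omega
        have hTle : T.length ≤ seg.length := by
          rw [hT]; exact List.IsPrefix.length_le (List.takeWhile_prefix _)
        rw [hlen, show seg.length - (seg.length - T.length) = T.length from by omega]
        rw [hT]
        exact take_length_of_prefix_pv _ _ (List.takeWhile_prefix _)
      rw [hpreA, hpreB]
      have hguard : ¬(T ≠ [] ∧ ¬ PySem.Chars.strIsspace T = true) := by
        rintro ⟨hne, hnot⟩
        apply hnot
        unfold PySem.Chars.strIsspace
        rw [Bool.and_eq_true]
        constructor
        · simp only [Bool.not_eq_eq_eq_not, Bool.not_true, List.isEmpty_eq_false_iff]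
          exact hne
        · rw [List.all_eq_true]
          intro x hx
          rw [hT] at hx
          exact List.mem_takeWhile_imp (by simpa using hx)
      rw [if_neg hguard]
      rw [PySem.List.slice_from s hs0]
      rcases aCont_spec T s start hs0 hslen with ⟨ha, hb⟩ | ⟨st', ha, h0', hlen', hb⟩
      · rw [ha, hb]
      · rw [ha, hb]
        dsimp only
        obtain ⟨he1, he2, hdisj⟩ := aEnd_spec T s st' h0' hlen'
        rcases hdisj with hl | hr
        · rw [← hl]
        · rw [← hr, List.map_append]
          have hded : (if PySem.Chars.startswith [] T then PySem.List.slice [] (some (T.length : Int)) none else ([] : List Char)) = ([] : List Char) := by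
            split <;> simp [PySem.List.slice_some_none]
          simp only [List.map_cons, List.map_nil, hded]
          exact congrArg (fun z => some (String.ofList z)) (rstrip_join_snoc_nil_pv _)
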